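-- pv_equiv track=rewrite | github.com/graphlearner/graphlearner | processing/notebooks/helper.py | create_Feature_combinations
-- ===== SOURCE A (Python) =====
-- def powerset(s):
--     """ Creates the powerset of s
--
--     Args:
--         s (list): list with feature names
--
--     Returns:
--         list: the power set of s
--     """
--     r = []
--     x = len(s)
--     for i in range(1 << x):
--         r.append([s[j] for j in range(x) if (i & (1 << j))])
--     return r
--
-- def create_Feature_combinations(candidates, canditates_inlcuded):
--     """Generate all combinations
--
--     Args:
--         candidates (list):  all featurs which are canditates
--         canditates_inlcuded (list): all featurs which will always be included
--     Returns:
--             list: all feature combinations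
--     """
--     final_canditates = []
--     for c in candidates:
--         if not c in canditates_inlcuded:
--             final_canditates.append(c)
--     all_combinations = powerset(final_canditates)
--
--     for combination in all_combinations:
--         combination += canditates_inlcuded
--     return all_combinations
-- ===== SOURCE B (Python) =====
-- def create_Feature_combinations(candidates, canditates_inlcuded):
--     final_candidates = [c for c in candidates if c not in canditates_inlcuded]
--     subsets = [[]]
--     for f in final_candidates:
--         subsets += [subset + [f] for subset in subsets]
--     return [subset + canditates_inlcuded for subset in subsets]
-- ===== Notes on version B (the rewrite author's own statement) =====
-- stated objective: simpler
-- what changed: Replaces the bitmask powerset (decoding bit positions of every integer in range(2**n)) with the incremental doubling construction that extends previously built subsets, and builds the output with comprehensions instead of in-place mutation.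
import Mathlib
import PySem

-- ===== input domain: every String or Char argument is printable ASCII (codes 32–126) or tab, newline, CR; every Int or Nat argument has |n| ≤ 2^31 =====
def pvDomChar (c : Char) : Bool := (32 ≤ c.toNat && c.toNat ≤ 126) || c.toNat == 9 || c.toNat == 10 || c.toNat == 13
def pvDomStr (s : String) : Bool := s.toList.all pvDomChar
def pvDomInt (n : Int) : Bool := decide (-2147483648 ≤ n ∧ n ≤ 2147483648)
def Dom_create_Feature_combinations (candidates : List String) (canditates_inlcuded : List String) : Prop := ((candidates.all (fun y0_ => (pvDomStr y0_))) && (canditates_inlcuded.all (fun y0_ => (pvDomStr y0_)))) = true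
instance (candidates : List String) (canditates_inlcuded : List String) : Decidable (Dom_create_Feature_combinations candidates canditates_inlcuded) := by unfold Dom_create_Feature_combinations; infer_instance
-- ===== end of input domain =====

-- B replaces the bitmask powerset with the incremental doubling construction (simpler); A's
-- in-place 'combination += …' mutation is modelled on the return value only.

-- ===== PORT A =====
-- powerset(s): r.append([s[j] for j in range(x) if (i & (1 << j))]) for i in range(1 << x)
def powersetA (s : List String) : List (List String) :=
  (List.range (1 <<< s.length)).foldl
    (fun r i =>
      r ++ [((List.range s.length).filter (fun j => i &&& (1 <<< j) != 0)).map
              (fun j => s.getD j "")]) []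

def create_Feature_combinations (candidates : List String) (canditates_inlcuded : List String) : List (List String) :=
  let final_canditates :=
    candidates.foldl (fun acc c => if !(canditates_inlcuded.contains c) then acc ++ [c] else acc) []
  let all_combinations := powersetA final_canditates
  -- 'for combination in all_combinations: combination += canditates_inlcuded' (in-place extend)
  all_combinations.map (fun combination => combination ++ canditates_inlcuded)

-- ===== PORT B =====
def create_Feature_combinations_alt (candidates : List String) (canditates_inlcuded : List String) : List (List String) :=
  let final_candidates := candidates.filter (fun c => !(canditates_inlcuded.contains c))
  let subsets :=
    final_candidates.foldl (fun res f => res ++ res.map (fun subset => subset ++ [f])) [[]]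
  subsets.map (fun subset => subset ++ canditates_inlcuded)

-- ===== PRECONDITION & SPEC =====
def Spec_create_Feature_combinations (candidates : List String) (canditates_inlcuded : List String) (out : List (List String)) : Prop := out = create_Feature_combinations_alt candidates canditates_inlcuded
instance (candidates : List String) (canditates_inlcuded : List String) (out : List (List String)) : Decidable (Spec_create_Feature_combinations candidates canditates_inlcuded out) := by unfold Spec_create_Feature_combinations; infer_instance

-- ===== CLAIM (what is proved, stated in full; the proofs are below) =====
def Claim_equal_create_Feature_combinations : Prop := ∀ (candidates : List String) (canditates_inlcuded : List String), Dom_create_Feature_combinations candidates canditates_inlcuded → Spec_create_Feature_combinations candidates canditates_inlcuded (create_Feature_combinations candidates canditates_inlcuded)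

-- ===== LEMMAS AND PROOFS =====

-- the body of A's comprehension, as a function of the bitmask i
def subsetOf (s : List String) (i : Nat) : List String :=
  ((List.range s.length).filter (fun j => i &&& (1 <<< j) != 0)).map (fun j => s.getD j "")

theorem bit_cond (i j : Nat) : (i &&& (1 <<< j) != 0) = i.testBit j := by
  rw [Nat.one_shiftLeft, Nat.and_two_pow]
  cases i.testBit j <;> simp

theorem powersetA_eq_map (s : List String) :
    powersetA s = (List.range (1 <<< s.length)).map (subsetOf s) := by
  unfold powersetA
  exact (PySem.List.foldl_append_singleton_eq_map (subsetOf s) (List.range (1 <<< s.length)) []).trans (List.nil_append _)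

theorem subsetOf_append_low (s : List String) (f : String) (i : Nat) (hi : i < 2 ^ s.length) :
    subsetOf (s ++ [f]) i = subsetOf s i := by
  unfold subsetOf
  have hlen : (s ++ [f]).length = s.length + 1 := by simp
  rw [hlen, List.range_succ, List.filter_append]
  have hbit : i.testBit s.length = false := Nat.testBit_lt_two_pow hi
  simp only [List.filter_cons, List.filter_nil, bit_cond, hbit]
  simp only [Bool.false_eq_true, if_false, List.append_nil]
  apply List.map_congr_left
  intro j hj
  have hj' : j < s.length := List.mem_range.mp (List.mem_of_mem_filter hj)
  simp [List.getD, List.getElem?_append_left, hj']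

theorem subsetOf_append_high (s : List String) (f : String) (k : Nat) (hk : k < 2 ^ s.length) :
    subsetOf (s ++ [f]) (2 ^ s.length + k) = subsetOf s k ++ [f] := by
  unfold subsetOf
  have hlen : (s ++ [f]).length = s.length + 1 := by simp
  rw [hlen, List.range_succ, List.filter_append]
  have hbit : (2 ^ s.length + k).testBit s.length = true := by
    rw [Nat.testBit_two_pow_add_eq, Nat.testBit_lt_two_pow hk]; rfl
  have hfilter : List.filter (fun j => (2 ^ s.length + k) &&& (1 <<< j) != 0) (List.range s.length)
      = List.filter (fun j => k &&& (1 <<< j) != 0) (List.range s.length) := by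
    apply List.filter_congr
    intro j hj
    rw [bit_cond, bit_cond, Nat.testBit_two_pow_add_gt (List.mem_range.mp hj)]
  rw [hfilter]
  simp only [List.filter_cons, List.filter_nil, bit_cond, hbit, if_true, List.map_append]
  congr 1
  · apply List.map_congr_left
    intro j hj
    have hj' : j < s.length := List.mem_range.mp (List.mem_of_mem_filter hj)
    simp [List.getD, List.getElem?_append_left, hj']
  · simp [List.getD]

theorem powersetA_append (s : List String) (f : String) :
    powersetA (s ++ [f]) = powersetA s ++ (powersetA s).map (fun t => t ++ [f]) := by
  rw [powersetA_eq_map, powersetA_eq_map]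
  have hlen : (s ++ [f]).length = s.length + 1 := by simp
  rw [hlen, Nat.one_shiftLeft, Nat.one_shiftLeft, pow_succ, Nat.mul_two, List.range_add]
  rw [List.map_append, List.map_map, List.map_map]
  congr 1
  · apply List.map_congr_left
    intro i hi
    exact subsetOf_append_low s f i (List.mem_range.mp hi)
  · apply List.map_congr_left
    intro k hk
    exact subsetOf_append_high s f k (List.mem_range.mp hk)

theorem powersetA_eq_doubling (s : List String) :
    powersetA s = s.foldl (fun res f => res ++ res.map (fun subset => subset ++ [f])) [[]] := by
  induction s using List.reverseRecOn with
  | nil => decide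
  | append_singleton s f ih =>
    rw [powersetA_append, List.foldl_append, ih]
    simp

-- ===== VERDICT (by name: the statement is the Claim_ definition above) =====
theorem create_Feature_combinations_spec : Claim_equal_create_Feature_combinations := by
  intro candidates canditates_inlcuded _
  unfold Spec_create_Feature_combinations create_Feature_combinations create_Feature_combinations_alt
  simp only [PySem.List.foldl_append_if_eq_filter, List.nil_append, powersetA_eq_doubling]
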